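-- pv_equiv track=rewrite | github.com/a08160/Coding_Test_Practice | Practice_0414.py | make_bigrams
-- ===== SOURCE A (Python) =====
-- def make_bigrams(s):
--     s = s.lower()
--     bigrams = []
--     for i in range(len(s) - 1):
--         pair = s[i:i+2]
--         if pair.isalpha():  # 알파벳 두 글자인 경우만 포함
--             bigrams.append(pair)
--     return bigrams
-- ===== SOURCE B (Python) =====
-- def make_bigrams(s):
--     s = s.lower()
--     runs = []
--     cur = ''
--     for c in s:
--         if c.isalpha():
--             cur += c
--         else:
--             if cur:
--                 runs.append(cur)
--             cur = ''
--     if cur: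
--         runs.append(cur)
--     out = []
--     for run in runs:
--         for a, b in zip(run, run[1:]):
--             out.append(a + b)
--     return out
-- ===== Notes on version B (the rewrite author's own statement) =====
-- stated objective: alternative
-- what changed: Replaces the per-index slice-and-pair.isalpha() scan with run segmentation (one pass splitting the lowered string into maximal alphabetic runs) followed by zip-based bigram emission within each run.
import Mathlib
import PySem

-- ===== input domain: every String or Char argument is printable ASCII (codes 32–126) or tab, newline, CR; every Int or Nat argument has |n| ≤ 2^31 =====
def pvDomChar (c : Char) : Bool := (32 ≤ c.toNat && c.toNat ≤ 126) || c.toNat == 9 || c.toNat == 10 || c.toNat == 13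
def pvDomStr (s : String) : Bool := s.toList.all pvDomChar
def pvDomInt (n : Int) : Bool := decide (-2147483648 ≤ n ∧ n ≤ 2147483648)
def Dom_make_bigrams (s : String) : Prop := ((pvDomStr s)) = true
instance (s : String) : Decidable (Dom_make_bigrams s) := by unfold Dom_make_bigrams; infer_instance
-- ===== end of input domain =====

-- B replaces A's per-index slice + pair.isalpha() scan with run segmentation plus zip-based
-- bigram emission inside each run (objective: alternative decomposition, same cost).

-- ===== PORT A =====
def make_bigrams (s : String) : List String :=
  let l := (PySem.Str.lower s).toList
  (PySem.List.pyRange 0 ((l.length : Int) - 1) 1).foldl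
    (fun bigrams i =>
      let pair := PySem.List.slice l (some i) (some (i + 2))
      if PySem.Chars.strIsalpha pair then bigrams ++ [String.ofList pair] else bigrams) []

-- ===== PORT B =====
-- one step of B's segmentation loop: extend the current run on an alphabetic char, close it otherwise
def mbStep (st : List (List Char) × List Char) (c : Char) : List (List Char) × List Char :=
  if PySem.Chars.isalpha c then (st.1, st.2 ++ [c])
  else (if st.2 ≠ [] then st.1 ++ [st.2] else st.1, [])

-- bigrams inside one run: 'for a, b in zip(run, run[1:]): out.append(a + b)'
def mbRunBigrams (r : List Char) : List String :=
  (r.zip (PySem.List.slice r (some 1) none)).map (fun ab => String.ofList [ab.1, ab.2])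

def make_bigrams_alt (s : String) : List String :=
  let l := (PySem.Str.lower s).toList
  let st := l.foldl mbStep ([], [])
  let runs := if st.2 ≠ [] then st.1 ++ [st.2] else st.1
  runs.foldl (fun out r => out ++ mbRunBigrams r) []

-- ===== PRECONDITION & SPEC =====
def Spec_make_bigrams (s : String) (out : List String) : Prop := out = make_bigrams_alt s
instance (s : String) (out : List String) : Decidable (Spec_make_bigrams s out) := by unfold Spec_make_bigrams; infer_instance

-- ===== CLAIM (what is proved, stated in full; the proofs are below) =====
def Claim_equal_make_bigrams : Prop := ∀ (s : String), Dom_make_bigrams s → Spec_make_bigrams s (make_bigrams s)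

-- ===== LEMMAS AND PROOFS =====

-- common reference function: consecutive bigrams whose two characters are both alphabetic
def mbG : List Char → List String
  | a :: b :: t =>
      (if PySem.Chars.isalpha a && PySem.Chars.isalpha b then [String.ofList [a, b]] else [])
        ++ mbG (b :: t)
  | _ => []

lemma strIsalpha_pair (a b : Char) :
    PySem.Chars.strIsalpha [a, b] = (PySem.Chars.isalpha a && PySem.Chars.isalpha b) := by
  simp [PySem.Chars.strIsalpha]

-- A-side: the filtered/mapped range over drop/take windows is mbG
lemma rangeScan_eq_mbG (l : List Char) :
    ((List.range (l.length - 1)).filter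
        (fun k => PySem.Chars.strIsalpha ((l.drop k).take 2))).map
      (fun k => String.ofList ((l.drop k).take 2)) = mbG l := by
  induction l with
  | nil => simp [mbG]
  | cons a t ih =>
    cases t with
    | nil => simp [mbG]
    | cons b t' =>
      have hlen : (a :: b :: t').length - 1 = (b :: t').length - 1 + 1 := by simp
      have hw : List.take 2 (a :: b :: t') = [a, b] := rfl
      have hfun1 : ((fun k => PySem.Chars.strIsalpha (((a :: b :: t').drop k).take 2)) ∘ Nat.succ)
          = fun k => PySem.Chars.strIsalpha (((b :: t').drop k).take 2) := by
        funext k; simp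
      have hfun2 : ((fun k => String.ofList (((a :: b :: t').drop k).take 2)) ∘ Nat.succ)
          = fun k => String.ofList (((b :: t').drop k).take 2) := by
        funext k; simp
      rw [hlen, List.range_succ_eq_map, List.filter_cons]
      simp only [List.drop_zero, hw,
        apply_ite (List.map (fun k => String.ofList (((a :: b :: t').drop k).take 2))),
        List.map_cons, List.filter_map, List.map_map]
      rw [hfun1, hfun2, ih, strIsalpha_pair]
      by_cases hab : (PySem.Chars.isalpha a && PySem.Chars.isalpha b) = true <;>
        simp [mbG, hab]

lemma make_bigrams_eq_mbG (s : String) :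
    make_bigrams s = mbG ((PySem.Str.lower s).toList) := by
  unfold make_bigrams
  set l := (PySem.Str.lower s).toList with hl
  rw [PySem.List.foldl_append_if, PySem.List.pyRange_one]
  simp only [sub_zero, List.nil_append]
  have hn : ((l.length : Int) - 1).toNat = l.length - 1 := by omega
  rw [hn, List.filter_map, List.map_map]
  have h1 : ((fun i => PySem.Chars.strIsalpha (PySem.List.slice l (some i) (some (i + 2))))
      ∘ fun k : Nat => (0 : Int) + k)
      = fun k : Nat => PySem.Chars.strIsalpha ((l.drop k).take 2) := by
    funext k
    have hcast : ((k : Int)) + 2 = ((k + 2 : Nat) : Int) := by push_cast; ring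
    simp only [Function.comp, zero_add]
    rw [hcast, PySem.List.slice_natCast, Nat.add_sub_cancel_left]
  have h2 : ((fun i => String.ofList (PySem.List.slice l (some i) (some (i + 2))))
      ∘ fun k : Nat => (0 : Int) + k)
      = fun k : Nat => String.ofList ((l.drop k).take 2) := by
    funext k
    have hcast : ((k : Int)) + 2 = ((k + 2 : Nat) : Int) := by push_cast; ring
    simp only [Function.comp, zero_add]
    rw [hcast, PySem.List.slice_natCast, Nat.add_sub_cancel_left]
  rw [h1, h2, rangeScan_eq_mbG]

-- B-side helpers
lemma mbRunBigrams_nil : mbRunBigrams [] = [] := rfl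

lemma mbRunBigrams_cons_cons (x y : Char) (t : List Char) :
    mbRunBigrams (x :: y :: t) = String.ofList [x, y] :: mbRunBigrams (y :: t) := by
  simp [mbRunBigrams, PySem.List.slice_from_one]

lemma mbRunBigrams_snoc (r : List Char) (c : Char) :
    mbRunBigrams (r ++ [c]) = mbRunBigrams r ++
      (match r.getLast? with
       | some x => [String.ofList [x, c]]
       | none => []) := by
  induction r with
  | nil => simp [mbRunBigrams, PySem.List.slice_from_one]
  | cons x r ih =>
    cases r with
    | nil => simp [mbRunBigrams, PySem.List.slice_from_one]
    | cons y t =>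
      have : (x :: y :: t) ++ [c] = x :: y :: (t ++ [c]) := by simp
      rw [this]
      have h2 : y :: (t ++ [c]) = (y :: t) ++ [c] := by simp
      rw [mbRunBigrams_cons_cons, h2, ih, mbRunBigrams_cons_cons]
      simp

-- state-prefix lemma: runs already collected are only appended to
lemma foldl_mbStep_prefix (rest : List Char) :
    ∀ (rs : List (List Char)) (cur : List Char),
      rest.foldl mbStep (rs, cur)
        = (rs ++ (rest.foldl mbStep ([], cur)).1, (rest.foldl mbStep ([], cur)).2) := by
  induction rest with
  | nil => intro rs cur; simp
  | cons c rest ih =>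
    intro rs cur
    by_cases h : PySem.Chars.isalpha c
    · simp only [List.foldl_cons, mbStep, h, if_true]
      exact ih rs (cur ++ [c])
    · have hb : PySem.Chars.isalpha c = false := by simpa using h
      by_cases hc : cur = []
      · subst hc
        simp only [List.foldl_cons, mbStep, hb, Bool.false_eq_true, if_false, ne_eq,
          not_true_eq_false]
        exact ih rs []
      · simp only [List.foldl_cons, mbStep, hb, Bool.false_eq_true, if_false, hc, ne_eq,
          not_false_eq_true, if_true]
        rw [ih (rs ++ [cur]) [], ih ([] ++ [cur]) []]
        simp

-- finalize a state and emit all bigrams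
def mbF (st : List (List Char) × List Char) : List String :=
  (if st.2 ≠ [] then st.1 ++ [st.2] else st.1).flatMap mbRunBigrams

-- crossing bigram between the current run's last char and the rest, plus the rest's bigrams
def mbX (o : Option Char) (rest : List Char) : List String :=
  (match o, rest with
   | some x, c :: _ => if PySem.Chars.isalpha c then [String.ofList [x, c]] else []
   | _, _ => []) ++ mbG rest

lemma mbG_cons_not_alpha (c : Char) (t : List Char) (h : PySem.Chars.isalpha c = false) :
    mbG (c :: t) = mbG t := by
  cases t with
  | nil => simp [mbG]
  | cons b t' => simp [mbG, h]

lemma mbB_run (rest : List Char) :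
    ∀ (cur : List Char),
      mbF (rest.foldl mbStep ([], cur)) = mbRunBigrams cur ++ mbX cur.getLast? rest := by
  induction rest with
  | nil =>
    intro cur
    by_cases h : cur = [] <;> simp [mbF, mbX, mbG, h, mbRunBigrams_nil]
  | cons c rest ih =>
    intro cur
    by_cases h : PySem.Chars.isalpha c
    · simp only [List.foldl_cons, mbStep, h, if_true]
      rw [ih (cur ++ [c])]
      rw [List.getLast?_concat, mbRunBigrams_snoc]
      cases hc : cur.getLast? with
      | none =>
        have hnil : cur = [] := by
          cases cur with
          | nil => rfl
          | cons a t => simp [List.getLast?_cons] at hc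
        subst hnil
        cases rest with
        | nil => simp [mbX, mbG, mbRunBigrams_nil]
        | cons d t => simp [mbX, mbG, h, mbRunBigrams_nil]
      | some x =>
        cases rest with
        | nil => simp [mbX, mbG, h]
        | cons d t =>
          simp only [mbX, mbG, h, Bool.true_and]
          by_cases hd : PySem.Chars.isalpha d <;> simp [hd]
    · have hb : PySem.Chars.isalpha c = false := by simpa using h
      by_cases hc : cur = []
      · subst hc
        simp only [List.foldl_cons, mbStep, hb, Bool.false_eq_true, if_false, ne_eq,
          not_true_eq_false]
        rw [ih []]
        simp [mbX, mbRunBigrams_nil, mbG_cons_not_alpha c rest hb]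
      · simp only [List.foldl_cons, mbStep, hb, Bool.false_eq_true, if_false, hc, ne_eq,
          not_false_eq_true, if_true, List.nil_append]
        rw [foldl_mbStep_prefix rest [cur] []]
        have hsplit : ∀ (rs : List (List Char)) (c2 : List Char),
            mbF ([cur] ++ rs, c2) = mbRunBigrams cur ++ mbF (rs, c2) := by
          intro rs c2
          by_cases h2 : c2 = [] <;> simp [mbF, h2]
        rw [hsplit, ih []]
        have hx : mbX cur.getLast? (c :: rest) = mbG rest := by
          have hG := mbG_cons_not_alpha c rest hb
          cases hl : cur.getLast? with
          | none => simp [mbX, hG]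
          | some x => simp [mbX, hG, hb]
        rw [hx]
        simp [mbX, mbRunBigrams_nil]

lemma make_bigrams_alt_eq_mbG (s : String) :
    make_bigrams_alt s = mbG ((PySem.Str.lower s).toList) := by
  unfold make_bigrams_alt
  set l := (PySem.Str.lower s).toList with hl
  rw [PySem.List.foldl_append_eq_flatMap]
  have := mbB_run l []
  simp only [mbF] at this
  rw [List.nil_append, this]
  simp [mbX, mbRunBigrams_nil]

-- ===== VERDICT (by name: the statement is the Claim_ definition above) =====
theorem make_bigrams_spec : Claim_equal_make_bigrams := by
  intro s _
  unfold Spec_make_bigrams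
  rw [make_bigrams_eq_mbG, make_bigrams_alt_eq_mbG]
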